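-- pv_equiv track=rewrite | github.com/jimmyounes/omnichannel_v2 | src/insights/define_functions.py | get_dimensions_autonomous
-- ===== SOURCE A (Python) =====
-- def get_dimensions_autonomous(autonomous_paths):
--     results={}
--     for path in autonomous_paths:
--         nodes=path.split("=>")
--         key=nodes[0].strip()
--         if(key not in results):
--             results[key]={}
--             results[key]["purchased"]=0
--             results[key]["purchase_value"]=0
--         results[key]["purchased"]+=autonomous_paths[path]["purchased"]
--         results[key]["purchase_value"]+=autonomous_paths[path]["purchase_value"]
--     return results
-- ===== SOURCE B (Python) =====
-- def get_dimensions_autonomous(autonomous_paths):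
--     pairs = [(p.split("=>")[0].strip(), v) for p, v in autonomous_paths.items()]
--     results = {}
--     for key in dict.fromkeys(k for k, _ in pairs):
--         results[key] = {
--             "purchased": sum(v["purchased"] for k, v in pairs if k == key),
--             "purchase_value": sum(v["purchase_value"] for k, v in pairs if k == key),
--         }
--     return results
-- ===== Notes on version B (the rewrite author's own statement) =====
-- stated objective: idiomatic
-- what changed: B replaces A's incremental accumulate-on-first-seen dict mutation by a declarative grouping pass: it maps each path to its stripped first node, dedups the keys in first-seen order, and builds each result entry in one shot by summing the matching entries' fields with sum() over comprehensions.
import Mathlib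
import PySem

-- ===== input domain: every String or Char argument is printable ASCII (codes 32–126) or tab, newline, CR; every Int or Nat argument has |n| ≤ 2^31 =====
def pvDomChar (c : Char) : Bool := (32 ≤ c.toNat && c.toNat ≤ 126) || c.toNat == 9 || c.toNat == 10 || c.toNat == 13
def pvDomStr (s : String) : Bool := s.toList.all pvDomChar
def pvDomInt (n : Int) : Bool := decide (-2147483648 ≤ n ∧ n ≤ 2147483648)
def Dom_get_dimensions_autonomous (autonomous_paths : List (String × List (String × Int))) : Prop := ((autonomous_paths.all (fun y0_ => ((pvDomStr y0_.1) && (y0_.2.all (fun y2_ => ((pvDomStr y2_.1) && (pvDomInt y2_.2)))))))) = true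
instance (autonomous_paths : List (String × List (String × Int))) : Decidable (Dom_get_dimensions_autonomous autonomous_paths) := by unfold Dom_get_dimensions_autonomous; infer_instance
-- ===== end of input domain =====

-- B groups by the stripped first node declaratively (ordered key dedup + per-key sums)
-- instead of A's incremental first-seen dict mutation; return values proved equal on Pre_.

-- nodes[0].strip() for nodes = path.split("=>") — computed verbatim by both Pythons
def pvKeyOf (s : String) : String := PySem.Str.strip (((PySem.Str.split? s "=>").getD []).headD "")

-- ===== PORT A =====
-- A's loop body: results mutated for one path; autonomous_paths[path] looked up in ap
def pvStepA (ap : PySem.Dict String (PySem.Dict String Int))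
    (results : PySem.Dict String (PySem.Dict String Int))
    (entry : String × List (String × Int)) : PySem.Dict String (PySem.Dict String Int) :=
  let path := entry.1
  let key := pvKeyOf path
  let results :=
    if results.contains key then results
    else
      let results := results.insert key PySem.Dict.empty
      let results := results.insert key ((results.getD key PySem.Dict.empty).insert "purchased" 0)
      results.insert key ((results.getD key PySem.Dict.empty).insert "purchase_value" 0)
  let results := results.insert key ((results.getD key PySem.Dict.empty).insert "purchased"
      ((results.getD key PySem.Dict.empty).getD "purchased" 0 +
       (ap.getD path PySem.Dict.empty).getD "purchased" 0))
  results.insert key ((results.getD key PySem.Dict.empty).insert "purchase_value"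
      ((results.getD key PySem.Dict.empty).getD "purchase_value" 0 +
       (ap.getD path PySem.Dict.empty).getD "purchase_value" 0))

def get_dimensions_autonomous (autonomous_paths : List (String × List (String × Int))) : List (String × List (String × Int)) :=
  let ap : PySem.Dict String (PySem.Dict String Int) :=
    PySem.Dict.mk (autonomous_paths.map (fun p => (p.1, PySem.Dict.mk p.2)))
  let results := autonomous_paths.foldl (pvStepA ap) PySem.Dict.empty
  results.items.map (fun p => (p.1, p.2.items))

-- ===== PORT B =====
def get_dimensions_autonomous_alt (autonomous_paths : List (String × List (String × Int))) : List (String × List (String × Int)) :=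
  let pairs := autonomous_paths.map (fun p => (pvKeyOf p.1, p.2))
  (PySem.List.dedup (pairs.map (·.1))).map (fun key =>
    (key, [("purchased",
              (((pairs.filter (fun q => q.1 == key)).map
                  (fun q => (PySem.Dict.mk q.2).getD "purchased" 0)).sum : Int)),
           ("purchase_value",
              (((pairs.filter (fun q => q.1 == key)).map
                  (fun q => (PySem.Dict.mk q.2).getD "purchase_value" 0)).sum : Int))]))

-- ===== PRECONDITION & SPEC =====
-- Pre_ excludes entries whose inner dict lacks a "purchased" or "purchase_value" key (A raises
-- KeyError there) and association lists with a duplicated outer key, which no Python dict can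
-- represent (A's first-match lookup on such lists is an artefact of the encoding).
def Pre_get_dimensions_autonomous (autonomous_paths : List (String × List (String × Int))) : Prop :=
  (autonomous_paths.map Prod.fst).Nodup ∧
  ∀ e ∈ autonomous_paths, "purchased" ∈ e.2.map Prod.fst ∧ "purchase_value" ∈ e.2.map Prod.fst
instance (autonomous_paths : List (String × List (String × Int))) : Decidable (Pre_get_dimensions_autonomous autonomous_paths) := by unfold Pre_get_dimensions_autonomous; infer_instance
def pvWitness_get_dimensions_autonomous : (List (String × List (String × Int))) :=
  [(" a =>b", [("purchased", 1), ("purchase_value", 2)]),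
   ("a", [("purchased", 3), ("purchase_value", 4)])]

def Spec_get_dimensions_autonomous (autonomous_paths : List (String × List (String × Int))) (out : List (String × List (String × Int))) : Prop := out = get_dimensions_autonomous_alt autonomous_paths
instance (autonomous_paths : List (String × List (String × Int))) (out : List (String × List (String × Int))) : Decidable (Spec_get_dimensions_autonomous autonomous_paths out) := by unfold Spec_get_dimensions_autonomous; infer_instance

-- ===== CLAIM (what is proved, stated in full; the proofs are below) =====
def Claim_equal_get_dimensions_autonomous : Prop := ∀ (autonomous_paths : List (String × List (String × Int))), Dom_get_dimensions_autonomous autonomous_paths → Pre_get_dimensions_autonomous autonomous_paths → Spec_get_dimensions_autonomous autonomous_paths (get_dimensions_autonomous autonomous_paths)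

-- ===== LEMMAS AND PROOFS =====

-- per-entry field values, group sums, and the canonical loop state
def pvP (e : String × List (String × Int)) : Int := (PySem.Dict.mk e.2).getD "purchased" 0
def pvV (e : String × List (String × Int)) : Int := (PySem.Dict.mk e.2).getD "purchase_value" 0
def pvS1 (l : List (String × List (String × Int))) (key : String) : Int :=
  ((l.filter (fun e => pvKeyOf e.1 == key)).map pvP).sum
def pvS2 (l : List (String × List (String × Int))) (key : String) : Int :=
  ((l.filter (fun e => pvKeyOf e.1 == key)).map pvV).sum
def pvInner (l : List (String × List (String × Int))) (key : String) : PySem.Dict String Int :=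
  PySem.Dict.mk [("purchased", pvS1 l key), ("purchase_value", pvS2 l key)]
def pvKeys (l : List (String × List (String × Int))) : List String :=
  PySem.List.dedup (l.map (fun e => pvKeyOf e.1))
def pvState (l : List (String × List (String × Int))) : PySem.Dict String (PySem.Dict String Int) :=
  PySem.Dict.mk ((pvKeys l).map (fun key => (key, pvInner l key)))

-- A's loop body with the lookup autonomous_paths[path] replaced by the entry's own value
def pvStepOwn (results : PySem.Dict String (PySem.Dict String Int))
    (entry : String × List (String × Int)) : PySem.Dict String (PySem.Dict String Int) :=
  let key := pvKeyOf entry.1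
  let results :=
    if results.contains key then results
    else
      let results := results.insert key PySem.Dict.empty
      let results := results.insert key ((results.getD key PySem.Dict.empty).insert "purchased" 0)
      results.insert key ((results.getD key PySem.Dict.empty).insert "purchase_value" 0)
  let results := results.insert key ((results.getD key PySem.Dict.empty).insert "purchased"
      ((results.getD key PySem.Dict.empty).getD "purchased" 0 + pvP entry))
  results.insert key ((results.getD key PySem.Dict.empty).insert "purchase_value"
      ((results.getD key PySem.Dict.empty).getD "purchase_value" 0 + pvV entry))

-- generic facts about map-shaped dicts  mk (keys.map (fun k => (k, f k)))
lemma pvMapDict_keys {ν : Type} (keys : List String) (f : String → ν) :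
    (PySem.Dict.mk (keys.map (fun k => (k, f k)))).keys = keys := by
  simp [PySem.Dict.keys_mk, List.map_map, Function.comp_def]

lemma pvMapDict_contains {ν : Type} (keys : List String) (f : String → ν) (K : String) :
    (PySem.Dict.mk (keys.map (fun k => (k, f k)))).contains K = decide (K ∈ keys) := by
  rw [PySem.Dict.contains_eq_decide_mem_keys, pvMapDict_keys]

lemma pvMapDict_getD {ν : Type} (keys : List String) (f : String → ν) (hnd : keys.Nodup)
    {K : String} (hK : K ∈ keys) (d0 : ν) :
    (PySem.Dict.mk (keys.map (fun k => (k, f k)))).getD K d0 = f K := by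
  apply PySem.Dict.getD_of_mem_items
  · exact List.mem_map.mpr ⟨K, hK, rfl⟩
  · rw [pvMapDict_keys]; exact hnd

lemma pvMapDict_insert_mem {ν : Type} (keys : List String) (f : String → ν)
    {K : String} (hK : K ∈ keys) (v : ν) :
    (PySem.Dict.mk (keys.map (fun k => (k, f k)))).insert K v
      = PySem.Dict.mk (keys.map (fun k => (k, if k = K then v else f k))) := by
  apply PySem.Dict.ext
  rw [PySem.Dict.items_insert_of_contains]
  · show (keys.map (fun k => (k, f k))).map _ = _
    rw [List.map_map]
    apply List.map_congr_left
    intro k _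
    by_cases hk : k = K <;> simp [hk]
  · rw [pvMapDict_contains]; exact decide_eq_true hK

lemma pvMapDict_insert_fresh {ν : Type} (keys : List String) (f : String → ν)
    {K : String} (hK : K ∉ keys) (v : ν) :
    (PySem.Dict.mk (keys.map (fun k => (k, f k)))).insert K v
      = PySem.Dict.mk ((keys ++ [K]).map (fun k => (k, if k = K then v else f k))) := by
  apply PySem.Dict.ext
  rw [PySem.Dict.items_insert_of_not_contains]
  · show keys.map (fun k => (k, f k)) ++ [(K, v)] = _
    rw [List.map_append]
    congr 1
    · apply List.map_congr_left
      intro k hk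
      have hne : k ≠ K := fun h => hK (h ▸ hk)
      simp [hne]
    · simp
  · rw [pvMapDict_contains]; exact decide_eq_false hK

-- literal inner dicts reduce definitionally
lemma pvInner_getD1 (a b : Int) :
    (PySem.Dict.mk [("purchased", a), ("purchase_value", b)]).getD "purchased" 0 = a := rfl
lemma pvInner_getD2 (a b : Int) :
    (PySem.Dict.mk [("purchased", a), ("purchase_value", b)]).getD "purchase_value" 0 = b := rfl
lemma pvInner_set1 (a b c : Int) :
    (PySem.Dict.mk [("purchased", a), ("purchase_value", b)]).insert "purchased" c
      = PySem.Dict.mk [("purchased", c), ("purchase_value", b)] := rfl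
lemma pvInner_set2 (a b c : Int) :
    (PySem.Dict.mk [("purchased", a), ("purchase_value", b)]).insert "purchase_value" c
      = PySem.Dict.mk [("purchased", a), ("purchase_value", c)] := rfl
lemma pvEmpty_set1 :
    (PySem.Dict.empty : PySem.Dict String Int).insert "purchased" 0
      = PySem.Dict.mk [("purchased", 0)] := rfl
lemma pvSingle_set2 (a b : Int) :
    (PySem.Dict.mk [("purchased", a)]).insert "purchase_value" b
      = PySem.Dict.mk [("purchased", a), ("purchase_value", b)] := rfl

lemma pvKeys_append (l : List (String × List (String × Int))) (e : String × List (String × Int)) :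
    pvKeys (l ++ [e]) = PySem.Set.add (pvKeys l) (pvKeyOf e.1) := by
  simp [pvKeys, PySem.List.dedup_eq_ofList, PySem.Set.ofList_eq_foldl, List.foldl_append]

lemma pvS1_append (l : List (String × List (String × Int))) (e : String × List (String × Int))
    (key : String) :
    pvS1 (l ++ [e]) key = pvS1 l key + (if pvKeyOf e.1 = key then pvP e else 0) := by
  by_cases h : pvKeyOf e.1 = key <;> simp [pvS1, List.filter_append, h]

lemma pvS2_append (l : List (String × List (String × Int))) (e : String × List (String × Int))
    (key : String) :
    pvS2 (l ++ [e]) key = pvS2 l key + (if pvKeyOf e.1 = key then pvV e else 0) := by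
  by_cases h : pvKeyOf e.1 = key <;> simp [pvS2, List.filter_append, h]

lemma pvS1_of_not_mem (l : List (String × List (String × Int))) {key : String}
    (h : key ∉ l.map (fun e => pvKeyOf e.1)) : pvS1 l key = 0 := by
  have hf : l.filter (fun e => pvKeyOf e.1 == key) = [] := by
    rw [List.filter_eq_nil_iff]
    intro e he hk
    exact h (List.mem_map.mpr ⟨e, he, by simpa using hk⟩)
  simp [pvS1, hf]

lemma pvS2_of_not_mem (l : List (String × List (String × Int))) {key : String}
    (h : key ∉ l.map (fun e => pvKeyOf e.1)) : pvS2 l key = 0 := by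
  have hf : l.filter (fun e => pvKeyOf e.1 == key) = [] := by
    rw [List.filter_eq_nil_iff]
    intro e he hk
    exact h (List.mem_map.mpr ⟨e, he, by simpa using hk⟩)
  simp [pvS2, hf]

-- the loop step preserves the canonical state
set_option maxHeartbeats 1000000 in
lemma pvStepOwn_state (l : List (String × List (String × Int))) (e : String × List (String × Int)) :
    pvStepOwn (pvState l) e = pvState (l ++ [e]) := by
  have hndk : (pvKeys l).Nodup := PySem.List.nodup_dedup _
  by_cases hK : pvKeyOf e.1 ∈ pvKeys l
  · -- key already present: the two += rounds update the existing inner dict in place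
    have hcont : (pvState l).contains (pvKeyOf e.1) = true := by
      rw [pvState, pvMapDict_contains]; exact decide_eq_true hK
    simp only [pvStepOwn, hcont, if_true]
    rw [show (pvState l).getD (pvKeyOf e.1) PySem.Dict.empty = pvInner l (pvKeyOf e.1) from by
          rw [pvState]; exact pvMapDict_getD _ _ hndk hK _]
    rw [pvInner, pvInner_getD1, pvInner_set1]
    rw [pvState, pvMapDict_insert_mem _ _ hK]
    rw [pvMapDict_getD _ _ hndk hK, if_pos rfl, pvInner_getD2, pvInner_set2]
    rw [pvMapDict_insert_mem _ _ hK]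
    rw [show pvState (l ++ [e]) = PySem.Dict.mk ((pvKeys l).map (fun key => (key, pvInner (l ++ [e]) key))) from by
          rw [pvState, pvKeys_append, PySem.Set.add_of_mem hK]]
    apply congrArg PySem.Dict.mk
    apply List.map_congr_left
    intro k hk
    by_cases h : k = pvKeyOf e.1
    · subst h
      rw [if_pos rfl]
      simp only [pvInner]
      rw [pvS1_append, pvS2_append, if_pos rfl, if_pos rfl]
    · have h' : ¬ pvKeyOf e.1 = k := fun hh => h hh.symm
      rw [if_neg h, if_neg h]
      simp only [pvInner]
      rw [pvS1_append, pvS2_append, if_neg h', if_neg h', add_zero, add_zero]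
  · -- fresh key: the init block appends a zeroed inner dict, then the += rounds fill it
    have hcont : (pvState l).contains (pvKeyOf e.1) = false := by
      rw [pvState, pvMapDict_contains]; exact decide_eq_false hK
    have hK2 : pvKeyOf e.1 ∈ pvKeys l ++ [pvKeyOf e.1] := by simp
    have hnd2 : (pvKeys l ++ [pvKeyOf e.1]).Nodup := by
      rw [List.nodup_append]
      exact ⟨hndk, List.nodup_singleton _,
        fun a ha b hb heq => hK ((heq.trans (List.mem_singleton.mp hb)) ▸ ha)⟩
    have hKl : pvKeyOf e.1 ∉ l.map (fun x => pvKeyOf x.1) := by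
      intro hm
      exact hK (by rw [pvKeys]; exact (PySem.List.mem_dedup _ _).mpr hm)
    simp only [pvStepOwn, hcont, Bool.false_eq_true, if_false]
    rw [pvState, pvMapDict_insert_fresh _ _ hK]
    rw [pvMapDict_getD _ _ hnd2 hK2, if_pos rfl, pvEmpty_set1, pvMapDict_insert_mem _ _ hK2]
    rw [pvMapDict_getD _ _ hnd2 hK2, if_pos rfl, pvSingle_set2, pvMapDict_insert_mem _ _ hK2]
    rw [pvMapDict_getD _ _ hnd2 hK2, if_pos rfl, pvInner_getD1, pvInner_set1, pvMapDict_insert_mem _ _ hK2]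
    rw [pvMapDict_getD _ _ hnd2 hK2, if_pos rfl, pvInner_getD2, pvInner_set2, pvMapDict_insert_mem _ _ hK2]
    rw [show pvState (l ++ [e]) = PySem.Dict.mk ((pvKeys l ++ [pvKeyOf e.1]).map (fun key => (key, pvInner (l ++ [e]) key))) from by
          rw [pvState, pvKeys_append, PySem.Set.add_of_not_mem hK]]
    apply congrArg PySem.Dict.mk
    apply List.map_congr_left
    intro k hk
    by_cases h : k = pvKeyOf e.1
    · subst h
      rw [if_pos rfl]
      simp only [pvInner]
      rw [pvS1_append, pvS2_append, if_pos rfl, if_pos rfl,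
          pvS1_of_not_mem l hKl, pvS2_of_not_mem l hKl]
    · have h' : ¬ pvKeyOf e.1 = k := fun hh => h hh.symm
      rw [if_neg h, if_neg h, if_neg h, if_neg h, if_neg h]
      simp only [pvInner]
      rw [pvS1_append, pvS2_append, if_neg h', if_neg h', add_zero, add_zero]

lemma pvFold_state (l : List (String × List (String × Int))) :
    l.foldl pvStepOwn PySem.Dict.empty = pvState l := by
  induction l using List.reverseRecOn with
  | nil => rfl
  | append_singleton l e ih =>
      rw [List.foldl_append, ih, List.foldl_cons, List.foldl_nil, pvStepOwn_state]

-- with unique outer keys, autonomous_paths[path] is the entry's own value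
lemma pvA_eq_own (l : List (String × List (String × Int))) (hnd : (l.map Prod.fst).Nodup) :
    get_dimensions_autonomous l
      = (l.foldl pvStepOwn PySem.Dict.empty).items.map (fun p => (p.1, p.2.items)) := by
  have h : l.foldl (pvStepA (PySem.Dict.mk (l.map (fun p => (p.1, PySem.Dict.mk p.2))))) PySem.Dict.empty
      = l.foldl pvStepOwn PySem.Dict.empty := by
    apply PySem.List.foldl_congr_mem
    intro acc e he
    have hv : (PySem.Dict.mk (l.map (fun p => (p.1, PySem.Dict.mk p.2)))).getD e.1 PySem.Dict.empty
        = PySem.Dict.mk e.2 := by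
      apply PySem.Dict.getD_of_mem_items
      · exact List.mem_map.mpr ⟨e, he, rfl⟩
      · simpa [PySem.Dict.keys_mk, List.map_map, Function.comp_def] using hnd
    simp only [pvStepA, pvStepOwn, pvP, pvV, hv]
  simp only [get_dimensions_autonomous]
  rw [h]

-- B computes the canonical state's items directly
lemma pvB_eq_state (l : List (String × List (String × Int))) :
    get_dimensions_autonomous_alt l = (pvState l).items.map (fun p => (p.1, p.2.items)) := by
  show _ = ((pvKeys l).map (fun key => (key, pvInner l key))).map (fun p => (p.1, p.2.items))
  simp only [get_dimensions_autonomous_alt, pvKeys, pvInner, pvS1, pvS2,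
    List.map_map, List.filter_map, Function.comp_def]
  exact List.map_congr_left (fun k _ => by exact rfl)

-- ===== VERDICT (by name: the statement is the Claim_ definition above) =====
theorem get_dimensions_autonomous_spec : Claim_equal_get_dimensions_autonomous := by
  intro l _ hpre
  unfold Spec_get_dimensions_autonomous
  rw [pvA_eq_own l hpre.1, pvFold_state, pvB_eq_state]
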